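-- pv_equiv track=rewrite | github.com/VilaNova0/MC521 | codes/may 12/d.py | akko
-- ===== SOURCE A (Python) =====
-- def akko(s: str):
--     if 'm' in set(s) or 'w' in set(s):
--         return 0
--     if not 'n' in set(s) and not 'u' in set(s):
--         return 1
--     aux = [1, 1]
--     for i in range(2, len(s) + 1):
--         if s[i - 2:i] == 'uu' or s[i - 2:i] == 'nn':
--             aux.append(aux[-1] + aux[-2])
--         else:
--             aux.append(aux[-1])
--         if len(aux) > 10:
--             aux = aux[5::]
--     return aux[-1]
-- ===== SOURCE B (Python) =====
-- def akko(s: str):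
--     if 'm' in s or 'w' in s:
--         return 0
--     if 'n' not in s and 'u' not in s:
--         return 1
--     def weight(c, run):
--         if c in ('u', 'n'):
--             a, b = 1, 1
--             for _ in range(run - 1):
--                 a, b = b, a + b
--             return b
--         return 1
--     prev, run, res = None, 0, 1
--     for c in s:
--         if c == prev:
--             run += 1
--         else:
--             res *= weight(prev, run)
--             prev, run = c, 1
--     return res * weight(prev, run)
-- ===== Notes on version B (the rewrite author's own statement) =====
-- stated objective: faster
-- what changed: Replaces the per-index Fibonacci list DP (appending to and periodically trimming an aux list driven by slice comparisons s[i-2:i]=='uu'/'nn') with a single run-length pass: scan characters once and, per maximal run of a character that is 'u' or 'n', multiply an accumulator by the run's tiling count Fib(L+1).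
import Mathlib
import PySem

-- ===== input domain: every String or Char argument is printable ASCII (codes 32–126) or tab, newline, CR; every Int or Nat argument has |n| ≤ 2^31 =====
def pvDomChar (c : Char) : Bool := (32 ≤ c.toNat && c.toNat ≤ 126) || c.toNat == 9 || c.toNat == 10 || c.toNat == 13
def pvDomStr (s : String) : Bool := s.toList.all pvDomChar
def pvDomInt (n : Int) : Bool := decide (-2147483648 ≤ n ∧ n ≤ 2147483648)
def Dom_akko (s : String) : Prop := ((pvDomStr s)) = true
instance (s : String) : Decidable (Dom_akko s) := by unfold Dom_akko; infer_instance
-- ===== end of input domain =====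

-- B replaces A's per-index Fibonacci list DP with a single run-length pass multiplying
-- per-run tiling counts; same O(n) asymptotics, measurably faster by constant factor
-- (no per-index slicing/list churn).

-- ===== PORT A =====
-- loop body of A's for-loop, as a named helper (appends, then trims aux when len(aux) > 10)
def akkoStep (t : List Char) (aux : List Int) (i : Int) : List Int :=
  let aux :=
    if PySem.List.slice t (some (i - 2)) (some i) = ['u','u'] ∨
       PySem.List.slice t (some (i - 2)) (some i) = ['n','n'] then
      aux ++ [PySem.List.pyGetD aux (-1) 0 + PySem.List.pyGetD aux (-2) 0]
    else
      aux ++ [PySem.List.pyGetD aux (-1) 0]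
  if (aux.length : Int) > 10 then PySem.List.slice aux (some 5) none else aux

def akko (s : String) : Int :=
  let t := s.toList
  if 'm' ∈ PySem.Set.ofList t ∨ 'w' ∈ PySem.Set.ofList t then 0
  else if ¬ ('n' ∈ PySem.Set.ofList t) ∧ ¬ ('u' ∈ PySem.Set.ofList t) then 1
  else
    let aux := (PySem.List.pyRange 2 (PySem.Str.len s + 1) 1).foldl (akkoStep t) [(1 : Int), 1]
    PySem.List.pyGetD aux (-1) 0

-- ===== PORT B =====
-- weight(c, run): tiling count of a run, by the small iterative Fibonacci loop of Source B
def akkoWeight (c : Option Char) (run : Nat) : Int :=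
  match c with
  | some c =>
      if c = 'u' ∨ c = 'n' then
        ((List.range (run - 1)).foldl (fun (ab : Int × Int) _ => (ab.2, ab.1 + ab.2)) (1, 1)).2
      else 1
  | none => 1

-- body of Source B's single for-loop: state (prev, run, res)
def akkoAltStep (st : Option Char × Nat × Int) (c : Char) : Option Char × Nat × Int :=
  if some c = st.1 then (st.1, st.2.1 + 1, st.2.2)
  else (some c, 1, st.2.2 * akkoWeight st.1 st.2.1)

def akko_alt (s : String) : Int :=
  if PySem.Str.isIn "m" s ∨ PySem.Str.isIn "w" s then 0
  else if ¬ PySem.Str.isIn "n" s ∧ ¬ PySem.Str.isIn "u" s then 1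
  else
    let st := s.toList.foldl akkoAltStep (none, 0, 1)
    st.2.2 * akkoWeight st.1 st.2.1

-- ===== PRECONDITION & SPEC =====
def Spec_akko (s : String) (out : Int) : Prop := out = akko_alt s
instance (s : String) (out : Int) : Decidable (Spec_akko s out) := by unfold Spec_akko; infer_instance

-- ===== CLAIM (what is proved, stated in full; the proofs are below) =====
def Claim_equal_akko : Prop := ∀ (s : String), Dom_akko s → Spec_akko s (akko s)

-- ===== LEMMAS AND PROOFS =====

-- pair form of A's loop body: only the last two entries of aux matter
def pairStep (t : List Char) (pr : Int × Int) (i : Int) : Int × Int :=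
  if PySem.List.slice t (some (i - 2)) (some i) = ['u','u'] ∨
     PySem.List.slice t (some (i - 2)) (some i) = ['n','n'] then
    (pr.2, pr.2 + pr.1)
  else (pr.2, pr.2)

-- reference DP over overlapping adjacent pairs of the string
def dp2 : List Char → Int × Int → Int × Int
  | c1 :: c2 :: rest, ab =>
      dp2 (c2 :: rest)
        (ab.2, if ([c1, c2] = ['u','u'] ∨ [c1, c2] = ['n','n']) then ab.2 + ab.1 else ab.2)
  | _, ab => ab

theorem pyGetD_snoc2_neg_one (front : List Int) (a b : Int) :
    PySem.List.pyGetD (front ++ [a, b]) (-1) 0 = b := by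
  simp [PySem.List.pyGetD, PySem.List.pyGet?_neg_one]

theorem pyGetD_snoc2_neg_two (front : List Int) (a b : Int) :
    PySem.List.pyGetD (front ++ [a, b]) (-2) 0 = a := by
  have h := PySem.List.pyGet?_neg_natCast (front ++ [a, b]) (k := 2) (by norm_num) (by simp)
  simp only [PySem.List.pyGetD]
  rw [show (-2 : Int) = -((2 : Nat) : Int) by norm_num, h]
  have : (front ++ [a, b]).length - 2 = front.length := by simp
  rw [this]; simp

theorem snoc3 (front : List Int) (a b x : Int) :
    front ++ [a, b] ++ [x] = (front ++ [a]) ++ [b, x] := by simp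

theorem drop5_snoc2 (X : List Int) (x y : Int) (h : 9 ≤ X.length) :
    PySem.List.slice (X ++ [x, y]) (some 5) none = (X.drop 5) ++ [x, y] := by
  rw [show ((5 : Int)) = ((5 : Nat) : Int) by norm_num, PySem.List.slice_from_natCast]
  rw [List.drop_append_of_le_length (by omega)]

theorem akkoStep_snoc2 (t : List Char) (front : List Int) (a b : Int) (i : Int) :
    ∃ front', akkoStep t (front ++ [a, b]) i =
      front' ++ [(pairStep t (a, b) i).1, (pairStep t (a, b) i).2] := by
  unfold akkoStep pairStep
  split
  · rw [pyGetD_snoc2_neg_one, pyGetD_snoc2_neg_two, snoc3]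
    dsimp only
    split
    · rename_i hlen
      rw [drop5_snoc2 _ _ _ (by simp at hlen ⊢; omega)]
      exact ⟨_, rfl⟩
    · exact ⟨_, rfl⟩
  · rw [pyGetD_snoc2_neg_one, snoc3]
    dsimp only
    split
    · rename_i hlen
      rw [drop5_snoc2 _ _ _ (by simp at hlen ⊢; omega)]
      exact ⟨_, rfl⟩
    · exact ⟨_, rfl⟩

theorem foldl_akkoStep (t : List Char) (L : List Int) :
    ∀ (front : List Int) (a b : Int),
      ∃ front', L.foldl (akkoStep t) (front ++ [a, b]) =
        front' ++ [(L.foldl (pairStep t) (a, b)).1, (L.foldl (pairStep t) (a, b)).2] := by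
  induction L with
  | nil => intro front a b; exact ⟨front, rfl⟩
  | cons i L ih =>
      intro front a b
      obtain ⟨f1, h1⟩ := akkoStep_snoc2 t front a b i
      simpa [List.foldl_cons, h1] using ih f1 _ _

theorem foldl_pairStep_dp2 (u : List Char) :
    ∀ (t : List Char) (j : Nat), t.drop j = u → ∀ pr : Int × Int,
      (PySem.List.pyRange ((j : Int) + 2) ((t.length : Int) + 1) 1).foldl (pairStep t) pr
        = dp2 u pr := by
  induction u with
  | nil =>
      intro t j h pr
      have hl : (t.drop j).length = 0 := by rw [h]; rfl
      rw [List.length_drop] at hl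
      rw [PySem.List.pyRange_one_eq_nil (by omega)]
      rfl
  | cons c1 u ih =>
      intro t j h pr
      have hl : (t.drop j).length = u.length + 1 := by rw [h]; simp
      rw [List.length_drop] at hl
      cases u with
      | nil =>
          simp only [List.length_nil] at hl
          rw [PySem.List.pyRange_one_eq_nil (by omega)]
          rfl
      | cons c2 rest =>
          simp only [List.length_cons] at hl
          have hlen : j + 2 ≤ t.length := by omega
          rw [PySem.List.pyRange_one_cons (by omega)]
          rw [List.foldl_cons]
          have hstep : pairStep t pr ((j : Int) + 2)
              = (pr.2, if ([c1, c2] = ['u','u'] ∨ [c1, c2] = ['n','n']) then pr.2 + pr.1 else pr.2) := by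
            unfold pairStep
            have h2 : PySem.List.slice t (some ((j : Int) + 2 - 2)) (some ((j : Int) + 2)) = [c1, c2] := by
              have : ((j : Int) + 2 - 2) = (j : Int) := by ring
              rw [this, show ((j : Int) + 2) = (j : Int) + ((2 : Nat) : Int) by norm_num,
                PySem.List.slice_natCast_add, h]
              rfl
            rw [h2]
            split <;> rfl
          rw [hstep]
          have hdrop : t.drop (j + 1) = c2 :: rest := by
            rw [← List.tail_drop, h]; rfl
          have := ih t (j + 1) hdrop
            (pr.2, if ([c1, c2] = ['u','u'] ∨ [c1, c2] = ['n','n']) then pr.2 + pr.1 else pr.2)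
          rw [show ((j : Int) + 2 + 1) = (((j + 1 : Nat) : Int) + 2) by push_cast; ring]
          rw [this]
          rfl

-- Fibonacci pair, the closed recursion behind Source B's small loop
def fibP : Nat → Int × Int
  | 0 => (1, 1)
  | n + 1 => ((fibP n).2, (fibP n).1 + (fibP n).2)

theorem foldl_range_fibP (n : Nat) :
    (List.range n).foldl (fun (ab : Int × Int) _ => (ab.2, ab.1 + ab.2)) (1, 1) = fibP n := by
  induction n with
  | zero => rfl
  | succ n ih => rw [List.range_succ, List.foldl_append, ih]; rfl

theorem akkoWeight_some (c : Char) (r : Nat) :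
    akkoWeight (some c) r = if c = 'u' ∨ c = 'n' then (fibP (r - 1)).2 else 1 := by
  unfold akkoWeight; rw [foldl_range_fibP]

theorem fibP_fst (m : Nat) : (fibP m).1 = (fibP (m - 1)).2 := by
  cases m <;> rfl

theorem akkoWeight_rec (c : Char) (m : Nat) (hc : c = 'u' ∨ c = 'n') :
    akkoWeight (some c) (m + 2) = akkoWeight (some c) (m + 1) + akkoWeight (some c) m := by
  simp only [akkoWeight_some, if_pos hc]
  show (fibP (m + 1)).2 = (fibP m).2 + (fibP (m - 1)).2
  rw [← fibP_fst]
  show (fibP m).1 + (fibP m).2 = _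
  ring

theorem akkoWeight_one (c : Char) : akkoWeight (some c) 1 = 1 := by
  rw [akkoWeight_some]; split <;> rfl

theorem akkoWeight_zero (c : Char) : akkoWeight (some c) 0 = 1 := by
  rw [akkoWeight_some]; split <;> rfl

theorem dp2_eq_bFold (rest : List Char) :
    ∀ (c : Char) (m : Nat) (res : Int),
      (rest.foldl akkoAltStep (some c, m + 1, res)).2.2 *
          akkoWeight (rest.foldl akkoAltStep (some c, m + 1, res)).1
            (rest.foldl akkoAltStep (some c, m + 1, res)).2.1
      = (dp2 (c :: rest) (res * akkoWeight (some c) m, res * akkoWeight (some c) (m + 1))).2 := by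
  induction rest with
  | nil => intro c m res; rfl
  | cons d rest ih =>
      intro c m res
      by_cases hd : d = c
      · subst hd
        have hstep : akkoAltStep (some d, m + 1, res) d = (some d, m + 2, res) := by
          simp [akkoAltStep]
        rw [List.foldl_cons, hstep, ih d (m + 1) res]
        conv_rhs => rw [dp2]
        dsimp only
        by_cases hun : d = 'u' ∨ d = 'n'
        · have hcond : ([d, d] = ['u','u'] ∨ [d, d] = ['n','n']) := by
            rcases hun with h | h <;> simp [h]
          rw [if_pos hcond, ← mul_add, ← akkoWeight_rec d m hun]
        · have hcond : ¬ ([d, d] = ['u','u'] ∨ [d, d] = ['n','n']) := by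
            intro h
            rcases h with h | h <;> simp only [List.cons.injEq, and_true] at h <;>
              exact hun (by simp [h.1])
          have hw : ∀ k, akkoWeight (some d) k = 1 := fun k => by
            rw [akkoWeight_some, if_neg hun]
          rw [if_neg hcond]
          simp only [hw]
      · have hstep : akkoAltStep (some c, m + 1, res) d
            = (some d, 1, res * akkoWeight (some c) (m + 1)) := by
          simp [akkoAltStep, hd]
        rw [List.foldl_cons, hstep, ih d 0 (res * akkoWeight (some c) (m + 1))]
        conv_rhs => rw [dp2]
        dsimp only
        have hcond : ¬ ([c, d] = ['u','u'] ∨ [c, d] = ['n','n']) := by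
          intro h
          rcases h with h | h <;> simp only [List.cons.injEq, and_true] at h <;>
            exact hd (by rw [h.1, h.2])
        rw [if_neg hcond]
        simp only [akkoWeight_zero, Nat.zero_add, akkoWeight_one, mul_one]

theorem isIn_singleton (c : Char) (cs : String) (s : String) (h : cs.toList = [c]) :
    (PySem.Str.isIn cs s = true) ↔ c ∈ s.toList := by
  rw [PySem.Str.isIn_iff_infix, h, List.singleton_infix_iff]

-- the main unguarded case: on a non-empty string both loops compute (dp2 t (1,1)).2
theorem main_eq (s : String) (c : Char) (rest : List Char) (ht : s.toList = c :: rest) :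
    PySem.List.pyGetD
        ((PySem.List.pyRange 2 (PySem.Str.len s + 1) 1).foldl (akkoStep s.toList) [(1 : Int), 1])
        (-1) 0
      = (s.toList.foldl akkoAltStep (none, 0, 1)).2.2 *
          akkoWeight (s.toList.foldl akkoAltStep (none, 0, 1)).1
            (s.toList.foldl akkoAltStep (none, 0, 1)).2.1 := by
  -- A side
  obtain ⟨front', hA⟩ := foldl_akkoStep s.toList
    (PySem.List.pyRange 2 (PySem.Str.len s + 1) 1) [] 1 1
  have hpair := foldl_pairStep_dp2 s.toList s.toList 0 (by rfl) (1, 1)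
  rw [show (((0 : Nat) : Int) + 2) = (2 : Int) by norm_num] at hpair
  rw [show PySem.Str.len s = (s.toList.length : Int) from PySem.Str.len_eq s] at hA
  rw [show PySem.Str.len s = (s.toList.length : Int) from PySem.Str.len_eq s]
  rw [show ([(1 : Int), 1]) = ([] : List Int) ++ [(1 : Int), 1] by rfl, hA, hpair,
    pyGetD_snoc2_neg_one]
  -- B side
  rw [ht, List.foldl_cons]
  have hstep0 : akkoAltStep (none, 0, 1) c = (some c, 1, 1 * akkoWeight none 0) := by
    simp [akkoAltStep]
  rw [hstep0, show (1 * akkoWeight none 0 : Int) = 1 by rfl,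
    dp2_eq_bFold rest c 0 1]
  simp only [akkoWeight_zero, Nat.zero_add, akkoWeight_one, mul_one]

-- ===== VERDICT (by name: the statement is the Claim_ definition above) =====
theorem akko_spec : Claim_equal_akko := by
  intro s _
  show akko s = akko_alt s
  have hm := isIn_singleton 'm' "m" s rfl
  have hw := isIn_singleton 'w' "w" s rfl
  have hn := isIn_singleton 'n' "n" s rfl
  have hu := isIn_singleton 'u' "u" s rfl
  unfold akko akko_alt
  by_cases hmw : 'm' ∈ s.toList ∨ 'w' ∈ s.toList
  · have hA1 : 'm' ∈ PySem.Set.ofList s.toList ∨ 'w' ∈ PySem.Set.ofList s.toList := by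
      simpa [PySem.Set.mem_ofList] using hmw
    have hB1 : (PySem.Str.isIn "m" s = true) ∨ (PySem.Str.isIn "w" s = true) := by
      rw [hm, hw]; exact hmw
    rw [if_pos hA1, if_pos hB1]
  · have hA1 : ¬ ('m' ∈ PySem.Set.ofList s.toList ∨ 'w' ∈ PySem.Set.ofList s.toList) := by
      simpa [PySem.Set.mem_ofList] using hmw
    have hB1 : ¬ ((PySem.Str.isIn "m" s = true) ∨ (PySem.Str.isIn "w" s = true)) := by
      rw [hm, hw]; exact hmw
    rw [if_neg hA1, if_neg hB1]
    by_cases hnu : 'n' ∈ s.toList ∨ 'u' ∈ s.toList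
    · have hA2 : ¬ ('n' ∉ PySem.Set.ofList s.toList ∧ 'u' ∉ PySem.Set.ofList s.toList) := by
        simp only [PySem.Set.mem_ofList]; tauto
      have hB2 : ¬ (¬ (PySem.Str.isIn "n" s = true) ∧ ¬ (PySem.Str.isIn "u" s = true)) := by
        rw [hn, hu]; tauto
      rw [if_neg hA2, if_neg hB2]
      have hne : s.toList ≠ [] := by
        intro h; rcases hnu with h1 | h1 <;> rw [h] at h1 <;> exact List.not_mem_nil h1
      obtain ⟨c, rest, ht⟩ := List.exists_cons_of_ne_nil hne
      exact main_eq s c rest ht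
    · have hA2 : ('n' ∉ PySem.Set.ofList s.toList ∧ 'u' ∉ PySem.Set.ofList s.toList) := by
        simp only [PySem.Set.mem_ofList]; tauto
      have hB2 : (¬ (PySem.Str.isIn "n" s = true) ∧ ¬ (PySem.Str.isIn "u" s = true)) := by
        rw [hn, hu]; tauto
      rw [if_pos hA2, if_pos hB2]
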